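-- pv_equiv track=rewrite | github.com/RaviKiranDev/Python-Exercises | Functions/Functions/AdvancedExtraCredit.py | cal_credit
-- ===== SOURCE A (Python) =====
-- def cal_credit(lst, value):
--     result = 0
--     sorted_lst = sorted(lst)
--     for inc,per in sorted_lst:
--         if value > inc:
--             result = result + (inc * per)
--             value -= inc
--         elif value > 0:
--             result = result + (value * per)
--             value -= inc
--     return result
-- ===== SOURCE B (Python) =====
-- def cal_credit(lst, value):
--     s = sorted(lst)
--     prefix = [0]
--     for inc, _ in s:
--         prefix.append(prefix[-1] + inc)
--     total = 0
--     for (inc, per), p in zip(s, prefix):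
--         rem = value - p
--         if rem > inc:
--             total += inc * per
--         elif rem > 0:
--             total += rem * per
--         else:
--             break
--     return total
-- ===== Notes on version B (the rewrite author's own statement) =====
-- stated objective: alternative
-- what changed: B precomputes a prefix-sum table of the sorted inc values, derives each tranche's remaining budget from that table via zip, and breaks at the first exhausted tranche, instead of A's single pass that mutates the running budget in an accumulator.
import Mathlib
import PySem

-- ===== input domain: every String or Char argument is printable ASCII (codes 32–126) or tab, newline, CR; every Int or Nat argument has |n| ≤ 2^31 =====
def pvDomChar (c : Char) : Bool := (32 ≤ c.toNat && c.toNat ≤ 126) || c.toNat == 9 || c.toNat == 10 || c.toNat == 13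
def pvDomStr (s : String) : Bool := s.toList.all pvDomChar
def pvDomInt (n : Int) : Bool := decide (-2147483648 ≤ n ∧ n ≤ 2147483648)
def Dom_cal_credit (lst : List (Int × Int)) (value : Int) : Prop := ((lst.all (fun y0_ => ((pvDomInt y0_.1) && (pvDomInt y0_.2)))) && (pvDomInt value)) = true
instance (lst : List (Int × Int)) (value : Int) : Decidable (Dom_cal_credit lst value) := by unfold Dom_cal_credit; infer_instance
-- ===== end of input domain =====

-- B: a prefix-sum table over the sorted inc values with an explicit break, instead of A's
-- accumulator pass mutating the running budget; same asymptotic cost (objective: alternative).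

-- ===== PORT A =====
-- loop body of A's for-loop (state = (result, value))
def pvStepA (st : Int × Int) (x : Int × Int) : Int × Int :=
  let result := st.1
  let value := st.2
  let inc := x.1
  let per := x.2
  if value > inc then (result + inc * per, value - inc)
  else if value > 0 then (result + value * per, value - inc)
  else (result, value)

def cal_credit (lst : List (Int × Int)) (value : Int) : Int :=
  let sorted_lst := PySem.List.sorted2 lst (fun x => x.1) (fun x => x.2)
  (sorted_lst.foldl pvStepA (0, value)).1

-- ===== PORT B =====
-- B's second loop (zip of the sorted list with the prefix table); the `else` branch is the break
def pvAltLoop (value : Int) (total : Int) : List ((Int × Int) × Int) → Int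
  | [] => total
  | (x, p) :: rest =>
    let inc := x.1
    let per := x.2
    let rem := value - p
    if rem > inc then pvAltLoop value (total + inc * per) rest
    else if rem > 0 then pvAltLoop value (total + rem * per) rest
    else total

def cal_credit_alt (lst : List (Int × Int)) (value : Int) : Int :=
  let s := PySem.List.sorted2 lst (fun x => x.1) (fun x => x.2)
  -- prefix = [0]; for inc, _ in s: prefix.append(prefix[-1] + inc)   (prefix is never empty, so
  -- getLastD 0 is exactly Python's prefix[-1])
  let pre := s.foldl (fun (acc : List Int) x => acc ++ [acc.getLastD 0 + x.1]) [0]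
  pvAltLoop value 0 (s.zip pre)

-- ===== PRECONDITION & SPEC =====
def Spec_cal_credit (lst : List (Int × Int)) (value : Int) (out : Int) : Prop := out = cal_credit_alt lst value
instance (lst : List (Int × Int)) (value : Int) (out : Int) : Decidable (Spec_cal_credit lst value out) := by unfold Spec_cal_credit; infer_instance

-- ===== CLAIM (what is proved, stated in full; the proofs are below) =====
def Claim_equal_cal_credit : Prop := ∀ (lst : List (Int × Int)) (value : Int), Dom_cal_credit lst value → Spec_cal_credit lst value (cal_credit lst value)

-- ===== LEMMAS AND PROOFS =====

-- the prefix sums of the inc values starting from offset c (spec of B's first loop)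
def pvPrefT (c : Int) : List (Int × Int) → List Int
  | [] => []
  | x :: t => (c + x.1) :: pvPrefT (c + x.1) t

theorem pvPrefix_foldl : ∀ (s : List (Int × Int)) (acc : List Int), acc ≠ [] →
    s.foldl (fun (acc : List Int) x => acc ++ [acc.getLastD 0 + x.1]) acc
      = acc ++ pvPrefT (acc.getLastD 0) s := by
  intro s
  induction s with
  | nil => intro acc h; simp [pvPrefT]
  | cons x t ih =>
    intro acc h
    have hne : acc ++ [acc.getLastD 0 + x.1] ≠ [] := by simp
    have := ih (acc ++ [acc.getLastD 0 + x.1]) hne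
    simp only [List.foldl_cons]
    rw [this]
    have hlast : (acc ++ [acc.getLastD 0 + x.1]).getLastD 0 = acc.getLastD 0 + x.1 := by
      simp
    rw [hlast]
    simp [pvPrefT]

theorem pvSkipA : ∀ (t : List (Int × Int)) (total v : Int), v ≤ 0 → (∀ p ∈ t, v ≤ p.1) →
    t.foldl pvStepA (total, v) = (total, v) := by
  intro t
  induction t with
  | nil => intro total v _ _; rfl
  | cons x r ih =>
    intro total v hv hall
    have hx : v ≤ x.1 := hall x (by simp)
    have hstep : pvStepA (total, v) x = (total, v) := by
      simp only [pvStepA]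
      rw [if_neg (by omega), if_neg (by omega)]
    simp only [List.foldl_cons, hstep]
    exact ih total v hv (fun p hp => hall p (by simp [hp]))

theorem pvMain : ∀ (s : List (Int × Int)), s.Pairwise (fun a b => a.1 ≤ b.1) →
    ∀ (v c total : Int),
      (s.foldl pvStepA (total, v - c)).1 = pvAltLoop v total (s.zip (c :: pvPrefT c s)) := by
  intro s
  induction s with
  | nil => intro _ v c total; rfl
  | cons x t ih =>
    intro hpw v c total
    rcases List.pairwise_cons.mp hpw with ⟨hx, ht⟩
    simp only [pvPrefT, List.zip_cons_cons, pvAltLoop, List.foldl_cons]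
    by_cases h1 : v - c > x.1
    · rw [if_pos h1]
      have hstep : pvStepA (total, v - c) x = (total + x.1 * x.2, v - c - x.1) := by
        simp only [pvStepA]
        rw [if_pos h1]
      rw [hstep]
      have : v - c - x.1 = v - (c + x.1) := by ring
      rw [this]
      exact ih ht v (c + x.1) (total + x.1 * x.2)
    · rw [if_neg h1]
      by_cases h2 : v - c > 0
      · rw [if_pos h2]
        have hstep : pvStepA (total, v - c) x = (total + (v - c) * x.2, v - c - x.1) := by
          simp only [pvStepA]
          rw [if_neg (by omega), if_pos h2]
        rw [hstep]
        have : v - c - x.1 = v - (c + x.1) := by ring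
        rw [this]
        exact ih ht v (c + x.1) (total + (v - c) * x.2)
      · rw [if_neg h2]
        have hstep : pvStepA (total, v - c) x = (total, v - c) := by
          simp only [pvStepA]
          rw [if_neg (by omega), if_neg (by omega)]
        rw [hstep]
        have hskip := pvSkipA t total (v - c) (by omega)
          (fun p hp => le_trans (by omega) (hx p hp))
        rw [hskip]

theorem pvInsertBy_pairwise {α : Type} (before : α → α → Bool) (P : α → α → Prop)
    (h1 : ∀ a b, before a b = true → P a b) (h2 : ∀ a b, before a b = false → P b a)
    (htr : ∀ a b c, P a b → P b c → P a c) (x : α) :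
    ∀ ys : List α, ys.Pairwise P → (PySem.List.insertBy before x ys).Pairwise P := by
  intro ys
  induction ys with
  | nil =>
    intro _
    simp [PySem.List.insertBy]
  | cons y r ih =>
    intro hpw
    rcases List.pairwise_cons.mp hpw with ⟨hy, hr⟩
    by_cases hb : before x y = true
    · rw [show PySem.List.insertBy before x (y :: r) = x :: y :: r by
        simp [PySem.List.insertBy, hb]]
      refine List.pairwise_cons.mpr ⟨?_, hpw⟩
      intro z hz
      rcases List.mem_cons.mp hz with rfl | hz
      · exact h1 x z hb
      · exact htr x y z (h1 x y hb) (hy z hz)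
    · have hb' : before x y = false := by simpa using hb
      rw [show PySem.List.insertBy before x (y :: r) = y :: PySem.List.insertBy before x r by
        simp [PySem.List.insertBy, hb']]
      refine List.pairwise_cons.mpr ⟨?_, ih hr⟩
      intro z hz
      rcases (PySem.List.mem_insertBy before x z r).mp hz with rfl | hz
      · exact h2 _ y hb'
      · exact hy z hz

theorem pvFoldl_insertBy_pairwise {α : Type} (before : α → α → Bool) (P : α → α → Prop)
    (h1 : ∀ a b, before a b = true → P a b) (h2 : ∀ a b, before a b = false → P b a)
    (htr : ∀ a b c, P a b → P b c → P a c) :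
    ∀ (xs acc : List α), acc.Pairwise P →
      (xs.foldl (fun acc x => PySem.List.insertBy before x acc) acc).Pairwise P := by
  intro xs
  induction xs with
  | nil => intro acc h; exact h
  | cons x t ih =>
    intro acc h
    exact ih _ (pvInsertBy_pairwise before P h1 h2 htr x acc h)

theorem pvSorted2_pairwise (lst : List (Int × Int)) :
    (PySem.List.sorted2 lst (fun x => x.1) (fun x => x.2)).Pairwise
      (fun a b : Int × Int => a.1 ≤ b.1) := by
  unfold PySem.List.sorted2
  simp only [if_neg (by decide : ¬ (false = true))]
  apply pvFoldl_insertBy_pairwise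
  · intro a b h
    simp only [Bool.or_eq_true, decide_eq_true_eq, Bool.and_eq_true, Bool.not_eq_true',
      decide_eq_false_iff_not] at h
    rcases h with h | ⟨h, _⟩ <;> omega
  · intro a b h
    simp only [Bool.or_eq_false_iff, decide_eq_false_iff_not] at h
    omega
  · intro a b c hab hbc; omega
  · exact List.Pairwise.nil

-- ===== VERDICT (by name: the statement is the Claim_ definition above) =====
theorem pvFinal (lst : List (Int × Int)) (value : Int) :
    cal_credit lst value = cal_credit_alt lst value := by
  unfold cal_credit cal_credit_alt
  simp only [pvPrefix_foldl _ [0] (by simp : ([0] : List Int) ≠ [])]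
  have hmain := pvMain (PySem.List.sorted2 lst (fun x => x.1) (fun x => x.2))
    (pvSorted2_pairwise lst) value 0 0
  rw [sub_zero] at hmain
  simpa using hmain

theorem cal_credit_spec : Claim_equal_cal_credit := by
  intro lst value _
  exact pvFinal lst value
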